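-- pv_equiv track=rewrite | github.com/RRReu/OPPExam | tektoplacarp.py | tek_sayilarin_toplam_ve_carpimini_hesapla
-- ===== SOURCE A (Python) =====
-- def tek_sayilarin_toplam_ve_carpimini_hesapla(N):
--     tek_toplam = 0
--     tek_carpim = 1
--     cift_kare_toplam = 0
--
--     for i in range(1, N+1):
--         if i % 2 != 0:
--             tek_toplam += i
--             tek_carpim *= i
--         else:
--             cift_kare_toplam += i**2
--
--     return tek_toplam, tek_carpim, cift_kare_toplam
-- ===== SOURCE B (Python) =====
-- def tek_sayilarin_toplam_ve_carpimini_hesapla(N):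
--     k = max((N + 1) // 2, 0)   # number of odd numbers in 1..N
--     m = max(N // 2, 0)         # number of even numbers in 1..N
--     carpim = 1
--     for i in range(1, N + 1, 2):
--         carpim *= i
--     return k * k, carpim, 2 * m * (m + 1) * (2 * m + 1) // 3
-- ===== Notes on version B (the rewrite author's own statement) =====
-- stated objective: simpler
-- what changed: Replaces the single filtered loop with closed-form formulas for the sum of odds and the sum of even squares, keeping only a short step-two loop for the odd product.
import Mathlib
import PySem

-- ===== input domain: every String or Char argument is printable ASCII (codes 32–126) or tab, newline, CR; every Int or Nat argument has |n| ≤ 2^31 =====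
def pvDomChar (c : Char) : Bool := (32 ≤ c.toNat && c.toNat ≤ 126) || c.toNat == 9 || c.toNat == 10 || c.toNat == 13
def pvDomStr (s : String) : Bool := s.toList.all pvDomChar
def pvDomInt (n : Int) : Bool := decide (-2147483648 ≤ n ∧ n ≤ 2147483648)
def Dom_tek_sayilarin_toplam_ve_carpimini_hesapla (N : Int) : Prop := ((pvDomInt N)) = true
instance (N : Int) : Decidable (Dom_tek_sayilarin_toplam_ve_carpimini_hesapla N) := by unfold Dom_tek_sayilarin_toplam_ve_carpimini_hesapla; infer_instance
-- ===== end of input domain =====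

-- B replaces A's filtered loop by closed-form formulas for the odd sum and the even-square sum,
-- keeping only a step-two loop for the odd product; objective: simpler.


-- ===== PORT A =====
-- loop body of A, named for the proofs; the fold below is A's for-loop verbatim
def tekStepA (s : Int × Int × Int) (i : Int) : Int × Int × Int :=
  if PySem.Int.mod i 2 ≠ 0 then (s.1 + i, s.2.1 * i, s.2.2)
  else (s.1, s.2.1, s.2.2 + i ^ 2)

def tek_sayilarin_toplam_ve_carpimini_hesapla (N : Int) : Int × Int × Int :=
  (PySem.List.pyRange 1 (N + 1) 1).foldl tekStepA (0, 1, 0)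

-- ===== PORT B =====
def tek_sayilarin_toplam_ve_carpimini_hesapla_alt (N : Int) : Int × Int × Int :=
  let k := max (PySem.Int.floordiv (N + 1) 2) 0
  let m := max (PySem.Int.floordiv N 2) 0
  let carpim := (PySem.List.pyRange 1 (N + 1) 2).foldl (fun acc i => acc * i) 1
  (k * k, carpim, PySem.Int.floordiv (2 * m * (m + 1) * (2 * m + 1)) 3)

-- ===== PRECONDITION & SPEC =====
def Spec_tek_sayilarin_toplam_ve_carpimini_hesapla (N : Int) (out : Int × Int × Int) : Prop := out = tek_sayilarin_toplam_ve_carpimini_hesapla_alt N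
instance (N : Int) (out : Int × Int × Int) : Decidable (Spec_tek_sayilarin_toplam_ve_carpimini_hesapla N out) := by unfold Spec_tek_sayilarin_toplam_ve_carpimini_hesapla; infer_instance

-- ===== CLAIM (what is proved, stated in full; the proofs are below) =====
def Claim_equal_tek_sayilarin_toplam_ve_carpimini_hesapla : Prop := ∀ (N : Int), Dom_tek_sayilarin_toplam_ve_carpimini_hesapla N → Spec_tek_sayilarin_toplam_ve_carpimini_hesapla N (tek_sayilarin_toplam_ve_carpimini_hesapla N)

-- ===== LEMMAS AND PROOFS =====

-- closed product of the first k odd numbers, in the exact shape of B's step-2 fold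
def tekProd (k : Nat) : Int :=
  ((List.range k).map (fun i => (1 : Int) + 2 * ↑i)).foldl (fun acc i => acc * i) 1

-- sum of the squares of the first m even numbers, recursively
def tekEvenSq : Nat → Nat
  | 0 => 0
  | m + 1 => tekEvenSq m + (2 * (m + 1)) ^ 2

theorem tekProd_succ (k : Nat) :
    tekProd (k + 1) = tekProd k * (1 + 2 * (k : Int)) := by
  simp [tekProd, List.range_succ]

theorem tekEvenSq_closed (m : Nat) :
    (2 * (m : Int) * ((m : Int) + 1) * (2 * (m : Int) + 1)) = 3 * (tekEvenSq m : Int) := by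
  induction m with
  | zero => simp [tekEvenSq]
  | succ m ih => push_cast [tekEvenSq]; push_cast at ih; linarith [ih]

theorem tekMain (n : Nat) :
    ((List.range n).map (fun k => (1 : Int) + ↑k)).foldl tekStepA (0, 1, 0) =
      ((((n + 1) / 2 : Nat) : Int) * (((n + 1) / 2 : Nat) : Int),
        tekProd ((n + 1) / 2), (tekEvenSq (n / 2) : Int)) := by
  induction n with
  | zero => simp [tekProd, tekEvenSq]
  | succ n ih =>
    rw [List.range_succ, List.map_append, List.foldl_append, ih]
    simp only [List.map_cons, List.map_nil, List.foldl_cons, List.foldl_nil, tekStepA]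
    rcases Nat.even_or_odd n with ⟨j, hj⟩ | ⟨j, hj⟩
    · -- n = j + j : the new element 1 + n is odd
      subst hj
      have hmod : PySem.Int.mod (1 + ((j + j : Nat) : Int)) 2 = 1 := by
        rw [PySem.Int.mod_eq_emod_of_pos (by norm_num)]; omega
      rw [if_pos (by rw [hmod]; norm_num)]
      have e1 : (j + j + 1) / 2 = j := by omega
      have e2 : (j + j + 1 + 1) / 2 = j + 1 := by omega
      have e3 : (j + j) / 2 = j := by omega
      simp only [e1, e2, e3]
      refine Prod.ext ?_ (Prod.ext ?_ ?_)
      · dsimp only; push_cast; ring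
      · dsimp only; rw [tekProd_succ]; congr 1; push_cast; ring
      · rfl
    · -- n = 2j + 1 : the new element 1 + n is even
      subst hj
      have hmod : PySem.Int.mod (1 + ((2 * j + 1 : Nat) : Int)) 2 = 0 := by
        rw [PySem.Int.mod_eq_emod_of_pos (by norm_num)]; omega
      rw [if_neg (by rw [hmod]; simp)]
      have e1 : (2 * j + 1 + 1) / 2 = j + 1 := by omega
      have e2 : (2 * j + 1 + 1 + 1) / 2 = j + 1 := by omega
      have e3 : (2 * j + 1) / 2 = j := by omega
      simp only [e1, e2, e3]
      refine Prod.ext rfl (Prod.ext rfl ?_)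
      dsimp only; push_cast [tekEvenSq]; ring

theorem tekFloordiv_three (t : Int) : PySem.Int.floordiv (3 * t) 3 = t := by
  rw [PySem.Int.floordiv_eq_ediv_of_pos (by norm_num)]
  exact Int.mul_ediv_cancel_left _ (by norm_num)

-- ===== VERDICT (by name: the statement is the Claim_ definition above) =====
theorem tek_sayilarin_toplam_ve_carpimini_hesapla_spec : Claim_equal_tek_sayilarin_toplam_ve_carpimini_hesapla := by
  intro N _
  show _ = _
  unfold tek_sayilarin_toplam_ve_carpimini_hesapla tek_sayilarin_toplam_ve_carpimini_hesapla_alt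
  rcases Int.lt_or_le N 0 with hN | hN
  · -- N < 0 : both loops are empty and both closed forms clamp to 0
    have hA : PySem.List.pyRange 1 (N + 1) 1 = [] :=
      PySem.List.pyRange_one_eq_nil (by omega)
    have hB : PySem.List.pyRange 1 (N + 1) 2 = [] := by
      rw [PySem.List.pyRange_of_pos _ _ (by norm_num), if_neg (by omega)]
      simp
    have hk : max (PySem.Int.floordiv (N + 1) 2) 0 = 0 := by
      rw [PySem.Int.floordiv_eq_ediv_of_pos (by norm_num)]
      have : (N + 1) / 2 ≤ 0 := by omega
      omega
    have hm : max (PySem.Int.floordiv N 2) 0 = 0 := by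
      rw [PySem.Int.floordiv_eq_ediv_of_pos (by norm_num)]
      have : N / 2 ≤ 0 := by omega
      omega
    simp only [hA, hB, hk, hm, List.foldl_nil]
    rw [show (2 * (0:Int) * (0 + 1) * (2 * 0 + 1)) = 3 * 0 by ring, tekFloordiv_three]
    norm_num
  · -- N = ↑n
    obtain ⟨n, rfl⟩ := Int.eq_ofNat_of_zero_le hN
    have hA : PySem.List.pyRange 1 ((n : Int) + 1) 1 =
        (List.range n).map (fun k => (1 : Int) + ↑k) := by
      have ht : (((n : Int) + 1) - 1).toNat = n := by omega
      rw [PySem.List.pyRange_one, ht]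
    have hB : PySem.List.pyRange 1 ((n : Int) + 1) 2 =
        (List.range ((n + 1) / 2)).map (fun i => (1 : Int) + 2 * ↑i) := by
      rw [PySem.List.pyRange_of_pos _ _ (by norm_num)]
      have hc : (if (1 : Int) < (n : Int) + 1 then (((n : Int) + 1 - 1 + 2 - 1) / 2).toNat else 0)
          = (n + 1) / 2 := by
        split_ifs with h <;> omega
      rw [hc]
    have hk : max (PySem.Int.floordiv ((n : Int) + 1) 2) 0 = (((n + 1) / 2 : Nat) : Int) := by
      have h2 := PySem.Int.floordiv_natCast (n + 1) 2
      rw [show (((2 : Nat) : Int)) = 2 from rfl] at h2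
      rw [show ((n : Int) + 1) = ((n + 1 : Nat) : Int) by push_cast; ring, h2]
      exact max_eq_left (Int.natCast_nonneg _)
    have hm : max (PySem.Int.floordiv (n : Int) 2) 0 = ((n / 2 : Nat) : Int) := by
      have h2 := PySem.Int.floordiv_natCast n 2
      rw [show (((2 : Nat) : Int)) = 2 from rfl] at h2
      rw [h2]
      exact max_eq_left (Int.natCast_nonneg _)
    rw [hA, tekMain]
    simp only [hk, hm, hB]
    refine Prod.ext rfl (Prod.ext rfl ?_)
    show _ = PySem.Int.floordiv _ 3
    rw [tekEvenSq_closed (n / 2), tekFloordiv_three]
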